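-- pv_equiv track=rewrite | github.com/akhillankalapalli/hacker-earth-python-solution | 2 Maximum borders.PY | max_border
-- ===== SOURCE A (Python) =====
-- def max_border(grid):
--     max_border = 0
--
--     for row in grid:
--         curr_border = 0
--         for cell in row:
--             if cell == '#':
--                 curr_border += 1
--                 max_border = max(max_border, curr_border)
--             else:
--                 curr_border = 0
--
--     for col in range(len(grid[0])):
--         curr_border = 0
--         for row in range(len(grid)):
--             if grid[row][col] == '#':
--                 curr_border += 1
--                 max_border = max(max_border, curr_border)
--             else:
--                 curr_border = 0
--
--     return max_border
-- ===== SOURCE B (Python) =====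
-- def max_border(grid):
--     cols = [''.join(row[c] for row in grid) for c in range(len(grid[0]))]
--     probe = ''
--     for line in list(grid) + cols:
--         while probe + '#' in line:
--             probe += '#'
--     return len(probe)
-- ===== Notes on version B (the rewrite author's own statement) =====
-- stated objective: alternative
-- what changed: Instead of counting consecutive '#' cells with a running counter and global max, B grows a monotone probe string of '#'s and tests it by substring containment (probe+'#' in line) against each row and each materialized column string; the answer is the final probe length.
import Mathlib
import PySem

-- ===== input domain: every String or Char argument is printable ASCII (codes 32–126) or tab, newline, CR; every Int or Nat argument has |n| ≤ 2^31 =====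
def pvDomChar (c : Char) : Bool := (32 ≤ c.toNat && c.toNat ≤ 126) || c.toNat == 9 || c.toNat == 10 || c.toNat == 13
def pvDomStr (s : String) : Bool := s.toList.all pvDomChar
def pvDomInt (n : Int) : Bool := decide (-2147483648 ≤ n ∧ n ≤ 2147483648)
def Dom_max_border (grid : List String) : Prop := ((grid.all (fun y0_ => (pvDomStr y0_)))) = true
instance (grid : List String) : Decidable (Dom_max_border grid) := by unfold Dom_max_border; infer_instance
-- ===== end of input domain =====

-- B drops A's running counter/global max entirely: it grows a monotone '#'-probe and
-- tests it by substring containment against each row and each column string; same task, different mechanism.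

-- ===== PORT A =====
-- the body of A's inner loop: state = (max_border, curr_border)
def pvStepA (p : Int × Int) (cell : Char) : Int × Int :=
  if cell = '#' then (max p.1 (p.2 + 1), p.2 + 1) else (p.1, 0)

def max_border (grid : List String) : Int :=
  let m1 : Int := grid.foldl (fun m row => (row.toList.foldl pvStepA (m, 0)).1) 0
  let n : Int := (((PySem.List.pyGet? grid 0).getD "").toList.length : Int)
  (PySem.List.pyRange 0 n 1).foldl
    (fun m col =>
      ((PySem.List.pyRange 0 (grid.length : Int) 1).foldl
        (fun p r => pvStepA p ((PySem.Str.pyGet? (PySem.List.pyGetD grid r "") col).getD ' '))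
        (m, 0)).1)
    m1

-- ===== PORT B =====
-- Python's `sub in s` on strings is substring containment: exact hand port
-- (try sub as a prefix at every start position)
def pvIsIn (sub : List Char) : List Char → Bool
  | [] => sub.isPrefixOf []
  | c :: t => sub.isPrefixOf (c :: t) || pvIsIn sub t

theorem pvIsIn_iff (sub : List Char) : ∀ l, pvIsIn sub l = true ↔ sub <:+: l := by
  intro l
  induction l with
  | nil => simp [pvIsIn, List.isPrefixOf_iff_prefix]
  | cons c t ih =>
    simp [pvIsIn, List.isPrefixOf_iff_prefix, List.infix_cons_iff, ih]

-- the `while probe + '#' in line: probe += '#'` loop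
def pvGrow (line : List Char) (probe : List Char) : List Char :=
  if h : pvIsIn (probe ++ ['#']) line then pvGrow line (probe ++ ['#']) else probe
termination_by line.length - probe.length
decreasing_by
  have hle := ((pvIsIn_iff _ line).mp h).length_le
  simp only [List.length_append, List.length_cons, List.length_nil] at hle ⊢
  omega

def max_border_alt (grid : List String) : Int :=
  let n : Int := (((PySem.List.pyGet? grid 0).getD "").toList.length : Int)
  let cols : List (List Char) := (PySem.List.pyRange 0 n 1).map
    (fun c => grid.map (fun row => (PySem.Str.pyGet? row c).getD ' '))
  (((grid.map String.toList ++ cols).foldl (fun probe line => pvGrow line probe) []).length : Int)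

-- ===== PRECONDITION & SPEC =====
-- Pre_ excludes exactly the inputs where A raises IndexError: the empty grid (grid[0])
-- and ragged grids with a row shorter than the first row (grid[row][col]); B raises there too.
def Pre_max_border (grid : List String) : Prop :=
  grid ≠ [] ∧ ∀ row ∈ grid, (grid.headD "").toList.length ≤ row.toList.length
instance (grid : List String) : Decidable (Pre_max_border grid) := by unfold Pre_max_border; infer_instance

def pvWitness_max_border : List String := ["#.", ".#"]

def Spec_max_border (grid : List String) (out : Int) : Prop := out = max_border_alt grid
instance (grid : List String) (out : Int) : Decidable (Spec_max_border grid out) := by unfold Spec_max_border; infer_instance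

-- ===== CLAIM (what is proved, stated in full; the proofs are below) =====
def Claim_equal_max_border : Prop := ∀ (grid : List String), Dom_max_border grid → Pre_max_border grid → Spec_max_border grid (max_border grid)

-- ===== LEMMAS AND PROOFS =====

-- proof-side specification: the longest run of '#' in a line
def pvLongestRun : List Char → Int
  | [] => 0
  | c :: t =>
    if c = '#' then
      max (((t.takeWhile (· == '#')).length : Int) + 1) (pvLongestRun (t.dropWhile (· == '#')))
    else pvLongestRun t
termination_by l => l.length
decreasing_by
  · simpa using Nat.lt_succ_of_le (List.length_dropWhile_le _ t)
  · simp

theorem pvLR_cons_hash (t : List Char) : pvLongestRun ('#' :: t)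
    = max (((t.takeWhile (· == '#')).length : Int) + 1) (pvLongestRun (t.dropWhile (· == '#'))) := by
  simp [pvLongestRun]

theorem pvLR_cons_ne (c : Char) (t : List Char) (h : ¬ c = '#') :
    pvLongestRun (c :: t) = pvLongestRun t := by
  simp [pvLongestRun, h]

theorem tw_cons_ne (c : Char) (t : List Char) (h : ¬ c = '#') :
    ((c :: t).takeWhile (· == '#')) = [] := by simp [h]

theorem dw_cons_ne (c : Char) (t : List Char) (h : ¬ c = '#') :
    ((c :: t).dropWhile (· == '#')) = c :: t := by simp [h]

theorem pvLR_nonneg (l : List Char) : 0 ≤ pvLongestRun l := by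
  induction l using pvLongestRun.induct with
  | case1 => simp [pvLongestRun]
  | case2 t ih => rw [pvLR_cons_hash]; omega
  | case3 c t h ih => rw [pvLR_cons_ne c t h]; exact ih

theorem pvLR_take_drop (t : List Char) :
    pvLongestRun t = max ((t.takeWhile (· == '#')).length : Int) (pvLongestRun (t.dropWhile (· == '#'))) := by
  cases t with
  | nil => simp [pvLongestRun]
  | cons x u =>
    by_cases hx : x = '#'
    · subst hx
      rw [pvLR_cons_hash]
      simp
    · have h0 := pvLR_nonneg u
      rw [pvLR_cons_ne x u hx, tw_cons_ne x u hx, dw_cons_ne x u hx, pvLR_cons_ne x u hx]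
      simp only [List.length_nil, Nat.cast_zero]
      omega

theorem pvLR_cons_le (c : Char) (t : List Char) : pvLongestRun t ≤ pvLongestRun (c :: t) := by
  by_cases h : c = '#'
  · subst h
    rw [pvLR_cons_hash, pvLR_take_drop t]
    omega
  · rw [pvLR_cons_ne c t h]

-- replicate-prefix vs takeWhile length
theorem pv_repl_prefix_le : ∀ (k : Nat) (t : List Char),
    List.replicate k '#' <+: t → k ≤ (t.takeWhile (· == '#')).length := by
  intro k
  induction k with
  | zero => intro t _; omega
  | succ m ih =>
    intro t hp
    cases t with
    | nil => simp [List.replicate_succ] at hp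
    | cons c u =>
      rw [List.replicate_succ, List.cons_prefix_cons] at hp
      obtain ⟨hc, hu⟩ := hp
      subst hc
      simpa using Nat.succ_le_succ (ih u hu)

theorem pv_le_prefix_repl : ∀ (k : Nat) (t : List Char),
    k ≤ (t.takeWhile (· == '#')).length → List.replicate k '#' <+: t := by
  intro k
  induction k with
  | zero => intro t _; simp
  | succ m ih =>
    intro t h
    cases t with
    | nil => simp at h
    | cons c u =>
      by_cases hc : c = '#'
      · subst hc
        simp only [List.takeWhile_cons, beq_self_eq_true, if_true, List.length_cons] at h
        rw [List.replicate_succ, List.cons_prefix_cons]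
        exact ⟨rfl, ih u (by omega)⟩
      · rw [tw_cons_ne c u hc] at h
        simp at h

-- the key characterisation: '#'*k occurs in l ↔ k ≤ longest run of l
theorem pv_infix_iff : ∀ (l : List Char) (k : Nat),
    (List.replicate k '#' <:+: l) ↔ (k : Int) ≤ pvLongestRun l := by
  intro l
  induction l with
  | nil =>
    intro k
    constructor
    · intro h
      have : List.replicate k '#' = [] := List.eq_nil_of_infix_nil h
      simp at this
      simp [this, pvLongestRun]
    · intro h
      have hk : (k : Int) ≤ 0 := by simpa [pvLongestRun] using h
      have : k = 0 := by omega
      simp [this]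
  | cons c t ih =>
    intro k
    constructor
    · intro h
      rcases List.infix_cons_iff.mp h with hp | hi
      · cases k with
        | zero =>
          have := pvLR_nonneg (c :: t)
          simpa using this
        | succ m =>
          rw [List.replicate_succ, List.cons_prefix_cons] at hp
          obtain ⟨hc, hu⟩ := hp
          subst hc
          have hm := pv_repl_prefix_le m t hu
          rw [pvLR_cons_hash]
          push_cast
          omega
      · calc (k : Int) ≤ pvLongestRun t := (ih k).mp hi
          _ ≤ pvLongestRun (c :: t) := pvLR_cons_le c t
    · intro h
      by_cases hc : c = '#'
      · subst hc
        rw [pvLR_cons_hash] at h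
        rcases le_max_iff.mp h with h1 | h2
        · cases k with
          | zero => simp
          | succ m =>
            have hm : m ≤ (t.takeWhile (· == '#')).length := by
              push_cast at h1; omega
            have := pv_le_prefix_repl m t hm
            rw [List.replicate_succ]
            exact ((List.cons_prefix_cons).mpr ⟨rfl, this⟩).isInfix
        · have : (k : Int) ≤ pvLongestRun t := by
            rw [pvLR_take_drop t]; omega
          exact List.infix_cons_iff.mpr (Or.inr ((ih k).mpr this))
      · rw [pvLR_cons_ne c t hc] at h
        exact List.infix_cons_iff.mpr (Or.inr ((ih k).mpr h))

-- pvGrow raises the probe length to max b (longest run)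
theorem pvGrow_repl (line : List Char) : ∀ (b : Nat),
    pvGrow line (List.replicate b '#') = List.replicate (max b (pvLongestRun line).toNat) '#' := by
  have key : ∀ (fuel : Nat) (b : Nat), line.length - b ≤ fuel →
      pvGrow line (List.replicate b '#') = List.replicate (max b (pvLongestRun line).toNat) '#' := by
    intro fuel
    induction fuel with
    | zero =>
      intro b hb
      rw [show pvGrow line (List.replicate b '#') = if pvIsIn (List.replicate b '#' ++ ['#']) line then pvGrow line (List.replicate b '#' ++ ['#']) else List.replicate b '#' from by rw [pvGrow.eq_def]; split <;> rfl]
      split_ifs with h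
      · exfalso
        have hle := ((pvIsIn_iff _ line).mp h).length_le
        simp at hle
        omega
      · have : ¬ ((b : Int) + 1 ≤ pvLongestRun line) := by
          intro hle
          apply h
          apply (pvIsIn_iff _ line).mpr
          have := (pv_infix_iff line (b + 1)).mpr (by push_cast; omega)
          simpa [List.replicate_succ'] using this
        have h0 := pvLR_nonneg line
        have : (pvLongestRun line).toNat ≤ b := by omega
        rw [Nat.max_eq_left this]
    | succ m ih =>
      intro b hb
      rw [show pvGrow line (List.replicate b '#') = if pvIsIn (List.replicate b '#' ++ ['#']) line then pvGrow line (List.replicate b '#' ++ ['#']) else List.replicate b '#' from by rw [pvGrow.eq_def]; split <;> rfl]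
      split_ifs with h
      · have hrun : ((b : Int) + 1) ≤ pvLongestRun line := by
          have := (pv_infix_iff line (b + 1)).mp
            ((pvIsIn_iff _ line).mp (by simpa [List.replicate_succ'] using h))
          push_cast at this; omega
        have hle := ((pvIsIn_iff _ line).mp h).length_le
        simp at hle
        have hstep : List.replicate b '#' ++ ['#'] = List.replicate (b + 1) '#' := by
          simp [List.replicate_succ']
        rw [hstep, ih (b + 1) (by omega)]
        congr 1
        have h0 := pvLR_nonneg line
        omega
      · have : ¬ ((b : Int) + 1 ≤ pvLongestRun line) := by
          intro hle
          apply h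
          apply (pvIsIn_iff _ line).mpr
          have := (pv_infix_iff line (b + 1)).mpr (by push_cast; omega)
          simpa [List.replicate_succ'] using this
        have h0 := pvLR_nonneg line
        have : (pvLongestRun line).toNat ≤ b := by omega
        rw [Nat.max_eq_left this]
  exact fun b => key (line.length - b) b le_rfl

-- B's fold over all lines computes the foldl-max of the runs (as a Nat probe length)
theorem pvFoldB (ls : List (List Char)) : ∀ (b : Nat),
    ((ls.foldl (fun probe line => pvGrow line probe) (List.replicate b '#')).length : Int)
      = (ls.map pvLongestRun).foldl max (b : Int) := by
  induction ls with
  | nil => intro b; simp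
  | cons l t ih =>
    intro b
    simp only [List.foldl_cons, List.map_cons]
    rw [pvGrow_repl l b, ih]
    congr 1
    have h0 := pvLR_nonneg l
    omega

-- A's counter read off the tail: pvLF c l = best value A's max_border would absorb from l with curr = c
def pvLF (c : Int) : List Char → Int
  | [] => c
  | ch :: t => if ch = '#' then pvLF (c + 1) t else max c (pvLF 0 t)

theorem pvLF_cons_hash (c : Int) (t : List Char) : pvLF c ('#' :: t) = pvLF (c + 1) t := rfl

theorem pvLF_cons_ne (x : Int) (c : Char) (t : List Char) (h : ¬ c = '#') :
    pvLF x (c :: t) = max x (pvLF 0 t) := by simp [pvLF, h]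

theorem pvLF_ge (l : List Char) : ∀ c, c ≤ pvLF c l := by
  induction l with
  | nil => intro c; simp [pvLF]
  | cons ch t ih =>
    intro c
    by_cases h : ch = '#'
    · subst h; rw [pvLF_cons_hash]
      exact le_trans (by omega) (ih (c + 1))
    · rw [pvLF_cons_ne c ch t h]; omega

theorem pvLF_eq (l : List Char) : ∀ c : Int, 0 ≤ c →
    pvLF c l = max (c + ((l.takeWhile (· == '#')).length : Int)) (pvLongestRun (l.dropWhile (· == '#'))) := by
  induction l with
  | nil => intro c hc; simp [pvLF, pvLongestRun]; omega
  | cons ch t ih =>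
    intro c hc
    by_cases h : ch = '#'
    · subst h
      rw [pvLF_cons_hash, ih (c + 1) (by omega)]
      simp
      omega
    · have h1 := ih 0 le_rfl
      have h3 := pvLR_nonneg t
      rw [pvLF_cons_ne c ch t h, h1, tw_cons_ne ch t h, dw_cons_ne ch t h,
        pvLR_cons_ne ch t h, pvLR_take_drop t]
      simp only [List.length_nil, Nat.cast_zero]
      omega

theorem pvFoldA (l : List Char) : ∀ m c : Int, 0 ≤ c → c ≤ m →
    (l.foldl pvStepA (m, c)).1 = max m (pvLF c l) := by
  induction l with
  | nil => intro m c _ hcm; simp [pvLF]; omega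
  | cons ch t ih =>
    intro m c hc hcm
    by_cases h : ch = '#'
    · subst h
      simp only [List.foldl_cons, pvStepA, if_true, pvLF_cons_hash]
      rw [ih (max m (c + 1)) (c + 1) (by omega) (by omega)]
      have := pvLF_ge t (c + 1)
      omega
    · simp only [List.foldl_cons, pvStepA, if_neg h]
      rw [ih m 0 le_rfl (by omega), pvLF_cons_ne c ch t h]
      have := pvLF_ge t (0 : Int)
      omega

theorem pvRowFold (l : List Char) (m : Int) (hm : 0 ≤ m) :
    (l.foldl pvStepA (m, 0)).1 = max m (pvLongestRun l) := by
  rw [pvFoldA l m 0 le_rfl hm, pvLF_eq l 0 le_rfl, pvLR_take_drop l]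
  omega

theorem pvFoldRows : ∀ (ls : List (List Char)) (m : Int), 0 ≤ m →
    ls.foldl (fun m l => (l.foldl pvStepA (m, 0)).1) m = (ls.map pvLongestRun).foldl max m := by
  intro ls
  induction ls with
  | nil => intro m _; rfl
  | cons l t ih =>
    intro m hm
    simp only [List.foldl_cons, List.map_cons]
    rw [pvRowFold l m hm, ih _ (by have := pvLR_nonneg l; omega)]

theorem pvFoldCols (grid : List String) : ∀ (idxs : List Int) (m : Int), 0 ≤ m →
    idxs.foldl (fun m col =>
      ((PySem.List.pyRange 0 (grid.length : Int) 1).foldl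
        (fun p r => pvStepA p ((PySem.Str.pyGet? (PySem.List.pyGetD grid r "") col).getD ' '))
        (m, 0)).1) m
    = (idxs.map (fun col => pvLongestRun (grid.map (fun row => (PySem.Str.pyGet? row col).getD ' ')))).foldl max m := by
  intro idxs
  induction idxs with
  | nil => intro m _; rfl
  | cons c t ih =>
    intro m hm
    simp only [List.foldl_cons, List.map_cons]
    rw [PySem.List.foldl_pyRange_zero_pyGetD' grid ""
          (fun p row => pvStepA p ((PySem.Str.pyGet? row c).getD ' ')) (m, 0),
        ← List.foldl_map (f := fun row => (PySem.Str.pyGet? row c).getD ' ') (g := pvStepA),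
        pvRowFold _ m hm,
        ih _ (by have := pvLR_nonneg (grid.map (fun row => (PySem.Str.pyGet? row c).getD ' ')); omega)]

-- ===== VERDICT (by name: the statement is the Claim_ definition above) =====
theorem max_border_spec : Claim_equal_max_border := by
  intro grid _ _
  unfold Spec_max_border max_border max_border_alt
  simp only
  rw [← List.foldl_map (f := String.toList) (g := fun m l => (l.foldl pvStepA (m, 0)).1),
      pvFoldRows _ 0 le_rfl, List.map_map]
  have hnn : (0 : Int) ≤ ((grid.map String.toList).map pvLongestRun).foldl max 0 :=
    (PySem.List.le_foldl_max _ 0).1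
  rw [pvFoldCols grid _ _ (by rwa [List.map_map] at hnn)]
  have hB := pvFoldB (grid.map String.toList ++
      ((PySem.List.pyRange 0 (((PySem.List.pyGet? grid 0).getD "").toList.length : Int) 1).map
        (fun c => grid.map (fun row => (PySem.Str.pyGet? row c).getD ' ')))) 0
  simp only [List.replicate_zero, Nat.cast_zero] at hB
  rw [hB, List.map_append, List.foldl_append]
  simp only [List.map_map]
  rfl
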